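-- pv_equiv track=rewrite | github.com/NineTailed9/Coder | coder.py | xor_multiple_rows
-- ===== SOURCE A (Python) =====
-- def xor(first_row, second_row):
--     result_row = []
--     for i in range(0, len(first_row)):
--         if first_row[i] == second_row[i]:
--             result_row.append(0)
--         else:
--             result_row.append(1)
--
--     return result_row
--
-- def xor_multiple_rows(matrix):
--     if len(matrix) == 0:
--         return [0]
--     if len(matrix) == 1:
--         return matrix[0]
--
--     buffer_row = []
--     for i in range(0, len(matrix[0])):
--         buffer_row.append(0)
--
--     for i in range(0, len(matrix)):
--         buffer_row = xor(buffer_row, matrix[i])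
--
--     return buffer_row
-- ===== SOURCE B (Python) =====
-- def xor_multiple_rows(matrix):
--     if len(matrix) == 0:
--         return [0]
--     if len(matrix) == 1:
--         return matrix[0]
--     result = []
--     for j in range(len(matrix[0])):
--         acc = 0
--         for row in matrix:
--             acc = 0 if acc == row[j] else 1
--         result.append(acc)
--     return result
-- ===== Notes on version B (the rewrite author's own statement) =====
-- stated objective: alternative
-- what changed: Column-major instead of row-major: B scans each column once with a single scalar accumulator (transposed traversal) instead of A's repeated whole-row xor producing intermediate buffer rows.
import Mathlib
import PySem

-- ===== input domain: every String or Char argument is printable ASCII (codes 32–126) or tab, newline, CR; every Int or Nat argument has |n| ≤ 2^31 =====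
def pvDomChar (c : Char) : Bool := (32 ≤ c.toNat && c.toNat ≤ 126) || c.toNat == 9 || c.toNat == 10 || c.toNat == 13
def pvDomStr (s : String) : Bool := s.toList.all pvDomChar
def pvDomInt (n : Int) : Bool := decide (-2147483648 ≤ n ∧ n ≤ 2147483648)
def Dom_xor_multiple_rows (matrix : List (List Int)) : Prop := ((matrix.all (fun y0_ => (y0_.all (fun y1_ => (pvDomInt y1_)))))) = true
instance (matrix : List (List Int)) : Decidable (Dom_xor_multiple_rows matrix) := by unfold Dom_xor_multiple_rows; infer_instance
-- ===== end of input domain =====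

-- B builds the result column-by-column with a scalar accumulator instead of A's row-by-row xor of whole buffer rows (alternative decomposition; return-value equivalence).

-- ===== PORT A =====
-- helper: Python's xor(first_row, second_row)
def pvXorRow (first second : List Int) : List Int :=
  (PySem.List.pyRange 0 (PySem.List.len first) 1).foldl
    (fun res i =>
      res ++ [if PySem.List.pyGetD first i 0 = PySem.List.pyGetD second i 0 then (0 : Int) else 1]) []

def xor_multiple_rows (matrix : List (List Int)) : List Int :=
  if matrix.length = 0 then [0]
  else if matrix.length = 1 then PySem.List.pyGetD matrix 0 []
  else
    let buffer0 : List Int :=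
      (PySem.List.pyRange 0 (PySem.List.len (PySem.List.pyGetD matrix 0 [])) 1).foldl
        (fun b _ => b ++ [(0 : Int)]) []
    (PySem.List.pyRange 0 (PySem.List.len matrix) 1).foldl
      (fun b i => pvXorRow b (PySem.List.pyGetD matrix i [])) buffer0

-- ===== PORT B =====
def xor_multiple_rows_alt (matrix : List (List Int)) : List Int :=
  if matrix.length = 0 then [0]
  else if matrix.length = 1 then PySem.List.pyGetD matrix 0 []
  else
    (PySem.List.pyRange 0 (PySem.List.len (PySem.List.pyGetD matrix 0 [])) 1).foldl
      (fun res j =>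
        res ++ [matrix.foldl (fun acc row => if acc = PySem.List.pyGetD row j 0 then (0 : Int) else 1) 0]) []

-- ===== PRECONDITION & SPEC =====
-- Pre_ excludes exactly the inputs where Python A raises IndexError (two or more rows and some
-- row shorter than the first row); Python B raises there too.
def Pre_xor_multiple_rows (matrix : List (List Int)) : Prop :=
  matrix.length ≤ 1 ∨ ∀ row ∈ matrix, (matrix.headD []).length ≤ row.length
instance (matrix : List (List Int)) : Decidable (Pre_xor_multiple_rows matrix) := by
  unfold Pre_xor_multiple_rows; infer_instance

def pvWitness_xor_multiple_rows : List (List Int) := [[1, 0, 1], [1, 1, 0], [0, 1, 1]]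

def Spec_xor_multiple_rows (matrix : List (List Int)) (out : List Int) : Prop := out = xor_multiple_rows_alt matrix
instance (matrix : List (List Int)) (out : List Int) : Decidable (Spec_xor_multiple_rows matrix out) := by unfold Spec_xor_multiple_rows; infer_instance

-- ===== CLAIM (what is proved, stated in full; the proofs are below) =====
def Claim_equal_xor_multiple_rows : Prop := ∀ (matrix : List (List Int)), Dom_xor_multiple_rows matrix → Pre_xor_multiple_rows matrix → Spec_xor_multiple_rows matrix (xor_multiple_rows matrix)

-- ===== LEMMAS AND PROOFS =====

-- A's helper xor, as a map over the first row's indices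
theorem pvXorRow_eq_map (b r : List Int) :
    pvXorRow b r =
      (List.range b.length).map (fun j => if b.getD j 0 = r.getD j 0 then (0 : Int) else 1) := by
  unfold pvXorRow
  rw [PySem.List.foldl_append_singleton_eq_map, PySem.List.pyRange_one]
  simp [List.map_map, Function.comp]

-- the loop invariant: folding A's row-xor over rows, starting from a column-indexed buffer,
-- computes per column the scalar fold B performs
theorem foldl_pvXorRow (L : Nat) :
    ∀ (rows : List (List Int)) (g : Nat → Int),
      rows.foldl pvXorRow ((List.range L).map g) =
        (List.range L).map
          (fun j => rows.foldl (fun acc row => if acc = row.getD j 0 then (0 : Int) else 1) (g j)) := by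
  intro rows
  induction rows with
  | nil => intro g; simp
  | cons r rs ih =>
    intro g
    have hx : pvXorRow ((List.range L).map g) r =
        (List.range L).map (fun j => if g j = r.getD j 0 then (0 : Int) else 1) := by
      rw [pvXorRow_eq_map]
      simp only [List.length_map, List.length_range]
      refine List.map_congr_left ?_
      intro j hj
      rw [List.mem_range] at hj
      rw [PySem.List.getD_map_range g L j 0 hj]
    simp only [List.foldl_cons, hx, ih]

theorem xor_multiple_rows_eq (matrix : List (List Int)) :
    xor_multiple_rows matrix = xor_multiple_rows_alt matrix := by
  unfold xor_multiple_rows xor_multiple_rows_alt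
  by_cases h0 : matrix.length = 0
  · simp [h0]
  · by_cases h1 : matrix.length = 1
    · simp [h1]
    · simp only [h0, h1, if_false]
      set r0 := PySem.List.pyGetD matrix 0 [] with hr0
      set L := r0.length with hL
      -- buffer of zeros is a column-indexed map
      have hbuf : (PySem.List.pyRange 0 (PySem.List.len r0) 1).foldl
            (fun b _ => b ++ [(0 : Int)]) [] = (List.range L).map (fun _ => (0 : Int)) := by
        rw [PySem.List.foldl_append_singleton_eq_map, PySem.List.pyRange_one]
        simp only [PySem.List.len_eq, Int.sub_zero, Int.toNat_natCast, List.map_map]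
        rfl
      -- A's outer index loop is a fold over the rows themselves
      rw [hbuf, PySem.List.foldl_pyRange_zero_pyGetD matrix [] pvXorRow, foldl_pvXorRow]
      -- B's column loop is a map over the column indices
      rw [PySem.List.foldl_append_singleton_eq_map, PySem.List.pyRange_one]
      simp only [PySem.List.len_eq, Int.sub_zero, Int.toNat_natCast, List.map_map]
      refine List.map_congr_left ?_
      intro k _
      simp [PySem.List.pyGetD_natCast]

-- ===== VERDICT (by name: the statement is the Claim_ definition above) =====
theorem xor_multiple_rows_spec : Claim_equal_xor_multiple_rows := by
  intro matrix _ _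
  unfold Spec_xor_multiple_rows
  exact xor_multiple_rows_eq matrix
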